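-- pv_equiv track=rewrite | github.com/PythonHugs/AdventOfCode2023 | puzzle_3/part_2_puzzle_3.py | get_gears_indices
-- ===== SOURCE A (Python) =====
-- def get_gears_indices(puzzle_input):
--     gears_indices = {}
--     for line_index, line in enumerate(puzzle_input):
--         gears_indices[line_index] = []
--         gears_stack = []
--         for i, char in enumerate(line):
--             if char == '*':
--                 gears_stack.append(i)
--                 if i == len(line) - 1:
--                     gears_indices[line_index].append(gears_stack)
--                     gears_stack = []
--             else:
--                 if len(gears_stack) > 0:
--                     gears_indices[line_index].append(gears_stack)
--                     gears_stack = []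
--     return gears_indices
-- ===== SOURCE B (Python) =====
-- def get_gears_indices(puzzle_input):
--     result = {}
--     for line_index, line in enumerate(puzzle_input):
--         runs = []
--         i = 0
--         while i < len(line):
--             if line[i] == '*':
--                 j = i + 1
--                 while j < len(line) and line[j] == '*':
--                     j += 1
--                 runs.append(list(range(i, j)))
--                 i = j
--             else:
--                 i += 1
--         result[line_index] = runs
--     return result
-- ===== Notes on version B (the rewrite author's own statement) =====
-- stated objective: simpler
-- what changed: A's per-character state machine (push each '*' onto a pending stack, flush on a non-'*' or at end of line) is replaced by a run-skipping scan: for each line, advance to each maximal run of consecutive '*', emit it at once as list(range(i, j)), and jump past it.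
import Mathlib
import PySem

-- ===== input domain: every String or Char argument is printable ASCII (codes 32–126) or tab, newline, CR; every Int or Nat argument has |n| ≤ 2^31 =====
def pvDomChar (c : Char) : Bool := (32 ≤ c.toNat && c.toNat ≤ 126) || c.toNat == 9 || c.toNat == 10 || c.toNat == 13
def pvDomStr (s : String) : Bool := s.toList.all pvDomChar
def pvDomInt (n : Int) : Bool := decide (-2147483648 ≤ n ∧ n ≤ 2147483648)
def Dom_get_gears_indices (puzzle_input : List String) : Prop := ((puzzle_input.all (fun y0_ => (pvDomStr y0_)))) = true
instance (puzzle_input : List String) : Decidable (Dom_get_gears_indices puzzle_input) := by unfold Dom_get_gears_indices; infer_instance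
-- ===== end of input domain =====

-- B replaces A's per-character stack/flush state machine by a run-skipping scan (find each
-- maximal '*' run, emit it as a range); objective: simpler. Return value only; no mutation.

-- ===== PORT A =====
-- inner per-character loop of A; Python appends into gears_indices[line_index] in place, so the
-- state carries that entry's current list (st.1) together with the pending gears_stack (st.2)
def pvInnerStepA (n : Int) (st : List (List Int) × List Int) (ic : Int × Char) :
    List (List Int) × List Int :=
  let entry := st.1
  let gears_stack := st.2
  let i := ic.1
  let char := ic.2
  if char = '*' then
    let gears_stack := gears_stack ++ [i]
    if i = n - 1 then (entry ++ [gears_stack], [])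
    else (entry, gears_stack)
  else
    if gears_stack.length > 0 then (entry ++ [gears_stack], [])
    else (entry, gears_stack)

-- body of A's outer loop for one line: gears_indices[line_index] = [], run the char loop on it
def pvLineA (gears_indices : PySem.Dict Int (List (List Int))) (line_index : Int)
    (line : List Char) : PySem.Dict Int (List (List Int)) :=
  gears_indices.insert line_index
    (((PySem.List.enumerate line).foldl (pvInnerStepA (line.length : Int)) ([], [])).1)

def get_gears_indices (puzzle_input : List String) : List (Int × List (List Int)) :=
  ((PySem.List.enumerate puzzle_input).foldl
    (fun gears_indices li => pvLineA gears_indices li.1 li.2.toList)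
    PySem.Dict.empty).items

-- ===== PORT B =====
-- the inner `while j < len(line) and line[j] == '*'` of B: length of the leading '*' run
def pvCountStars : List Char → Nat
  | [] => 0
  | c :: rest => if c = '*' then pvCountStars rest + 1 else 0

-- the outer `while i < len(line)` of B: skip non-'*', emit each maximal run as list(range(i, j))
def pvStarRuns : List Char → Int → List (List Int)
  | [], _ => []
  | c :: rest, i =>
    if c = '*' then
      let k := pvCountStars rest
      PySem.List.pyRange i (i + k + 1) :: pvStarRuns (rest.drop k) (i + k + 1)
    else pvStarRuns rest (i + 1)
termination_by cs _ => cs.length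
decreasing_by
  · simp only [List.length_drop, List.length_cons]
    omega
  · simp

def get_gears_indices_alt (puzzle_input : List String) : List (Int × List (List Int)) :=
  (PySem.List.enumerate puzzle_input).map (fun p => (p.1, pvStarRuns p.2.toList 0))

-- ===== PRECONDITION & SPEC =====
def Spec_get_gears_indices (puzzle_input : List String) (out : List (Int × List (List Int))) : Prop := out = get_gears_indices_alt puzzle_input
instance (puzzle_input : List String) (out : List (Int × List (List Int))) : Decidable (Spec_get_gears_indices puzzle_input out) := by unfold Spec_get_gears_indices; infer_instance

-- ===== CLAIM (what is proved, stated in full; the proofs are below) =====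
def Claim_equal_get_gears_indices : Prop := ∀ (puzzle_input : List String), Dom_get_gears_indices puzzle_input → Spec_get_gears_indices puzzle_input (get_gears_indices puzzle_input)

-- ===== LEMMAS AND PROOFS =====

-- A's pending gears_stack merged in front of the runs of the remaining suffix
def pvGlue (stack : List Int) (cs : List Char) (p : Int) : List (List Int) :=
  match stack, cs with
  | [], _ => pvStarRuns cs p
  | _, [] => []
  | st, c :: rest =>
    if c = '*' then
      match pvStarRuns (c :: rest) p with
      | r :: rs => (st ++ r) :: rs
      | [] => []
    else st :: pvStarRuns (c :: rest) p

theorem pvContains_false {ν : Type} (D : List (Int × ν)) (k : Int)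
    (h : ∀ q ∈ D, q.1 ≠ k) : (PySem.Dict.mk D).contains k = false := by
  simp only [PySem.Dict.contains, List.any_eq_false]
  intro q hq
  simpa using h q hq

theorem pvCountStars_head {c : Char} {rest : List Char} (h : c = '*') :
    pvCountStars (c :: rest) = pvCountStars rest + 1 := by simp [pvCountStars, h]

theorem pvCountStars_head_ne {c : Char} {rest : List Char} (h : ¬ c = '*') :
    pvCountStars (c :: rest) = 0 := by simp [pvCountStars, h]

theorem pvStarRuns_cons_star {c : Char} (rest : List Char) (p : Int) (h : c = '*') :
    pvStarRuns (c :: rest) p =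
      PySem.List.pyRange p (p + pvCountStars rest + 1) ::
        pvStarRuns (rest.drop (pvCountStars rest)) (p + pvCountStars rest + 1) := by
  rw [pvStarRuns]; simp [h]

theorem pvStarRuns_cons_ne {c : Char} (rest : List Char) (p : Int) (h : ¬ c = '*') :
    pvStarRuns (c :: rest) p = pvStarRuns rest (p + 1) := by
  rw [pvStarRuns]; simp [h]

-- merging the pending run with the runs of the suffix: one step of '*'
theorem pvGlue_nil (cs : List Char) (p : Int) : pvGlue [] cs p = pvStarRuns cs p := rfl

theorem pvGlue_star (stack : List Int) (c : Char) (rest : List Char) (p : Int)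
    (hc : c = '*') (hrest : rest ≠ []) :
    pvGlue (stack ++ [p]) rest (p + 1) = pvGlue stack (c :: rest) p := by
  subst hc
  obtain ⟨d, rest', rfl⟩ := List.exists_cons_of_ne_nil hrest
  by_cases hd : d = '*'
  · subst hd
    have hk : pvCountStars ('*' :: rest') = pvCountStars rest' + 1 := pvCountStars_head rfl
    have hrange : PySem.List.pyRange p (p + (pvCountStars rest' + 1 : Nat) + 1) =
        p :: PySem.List.pyRange (p + 1) (p + 1 + (pvCountStars rest' : Nat) + 1) := by
      have h1 : p < p + (pvCountStars rest' + 1 : Nat) + 1 := by push_cast; omega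
      have h2 : p + ((pvCountStars rest' + 1 : Nat) : Int) + 1
          = p + 1 + ((pvCountStars rest' : Nat) : Int) + 1 := by push_cast; ring
      rw [PySem.List.pyRange_one_cons h1, h2]
    have hA := pvStarRuns_cons_star (c := '*') ('*' :: rest') p rfl
    have hB := pvStarRuns_cons_star (c := '*') rest' (p + 1) rfl
    rw [hk] at hA
    have hdrop : ('*' :: rest').drop (pvCountStars rest' + 1) = rest'.drop (pvCountStars rest') := by
      simp
    have hidx : p + ((pvCountStars rest' + 1 : Nat) : Int) + 1
        = p + 1 + ((pvCountStars rest' : Nat) : Int) + 1 := by push_cast; ring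
    rw [hdrop, hrange, hidx] at hA
    cases stack with
    | nil => simp [pvGlue, hA, hB]
    | cons s ss => simp [pvGlue, hA, hB]
  · have hk : pvCountStars (d :: rest') = 0 := pvCountStars_head_ne hd
    have hA := pvStarRuns_cons_star (c := '*') (d :: rest') p rfl
    rw [hk] at hA
    have hz : p + ((0 : Nat) : Int) + 1 = p + 1 := by push_cast; ring
    have hrange : PySem.List.pyRange p (p + ((0 : Nat) : Int) + 1) = [p] := by
      rw [hz]; exact PySem.List.pyRange_one_singleton p
    rw [hrange, hz] at hA
    simp only [List.drop_zero] at hA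
    cases stack with
    | nil => simp [pvGlue, hd, hA]
    | cons s ss => simp [pvGlue, hd, hA]

-- the inner character loop of A, fully characterised
theorem pvInnerEq (n : Int) :
    ∀ (cs : List Char) (p : Int) (v : List (List Int)) (stack : List Int),
      p + (cs.length : Int) = n → (cs = [] → stack = []) →
      (PySem.List.enumerate cs p).foldl (pvInnerStepA n) (v, stack)
        = (v ++ pvGlue stack cs p, []) := by
  intro cs
  induction cs with
  | nil =>
    intro p v stack _ hst
    rw [hst rfl]
    simp [PySem.List.enumerate, pvGlue, pvStarRuns]
  | cons c rest ih =>
    intro p v stack hn _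
    rw [PySem.List.enumerate_cons, List.foldl_cons]
    by_cases hc : c = '*'
    · subst hc
      by_cases hp : p = n - 1
      · -- last character of the line: flush
        have hrest : rest = [] := by
          have : (rest.length : Int) = 0 := by simp at hn; omega
          simpa using this
        subst hrest
        have hstep : pvInnerStepA n (v, stack) (p, '*') = (v ++ [stack ++ [p]], []) := by
          simp only [pvInnerStepA, if_true, hp]
        rw [hstep]
        rw [ih (p + 1) (v ++ [stack ++ [p]]) [] (by simp at hn ⊢; omega) (fun _ => rfl)]
        have hr : pvStarRuns ['*'] p = [[p]] := by
          rw [pvStarRuns_cons_star [] p rfl]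
          have h0 : PySem.List.pyRange p (p + ((pvCountStars [] : Nat) : Int) + 1) = [p] := by
            show PySem.List.pyRange p (p + ((0 : Nat) : Int) + 1) = [p]
            have : p + ((0 : Nat) : Int) + 1 = p + 1 := by push_cast; ring
            rw [this]; exact PySem.List.pyRange_one_singleton p
          rw [h0]
          simp [pvStarRuns]
        have hglue : pvGlue stack ['*'] p = [stack ++ [p]] := by
          cases stack with
          | nil => rw [pvGlue_nil, hr]; simp
          | cons s ss => simp [pvGlue, hr]
        rw [hglue, pvGlue_nil]
        simp [pvStarRuns]
      · -- a '*' strictly before the end: push onto the stack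
        have hrest : rest ≠ [] := by
          intro h; subst h; simp at hn; omega
        have hstep : pvInnerStepA n (v, stack) (p, '*') = (v, stack ++ [p]) := by
          simp [pvInnerStepA, hp]
        rw [hstep]
        rw [ih (p + 1) v (stack ++ [p]) (by simp at hn ⊢; omega)
          (by intro h; exact absurd h hrest)]
        rw [pvGlue_star stack '*' rest p rfl hrest]
    · -- a non-'*' character
      cases stack with
      | nil =>
        have hstep : pvInnerStepA n (v, ([] : List Int)) (p, c) = (v, []) := by
          simp [pvInnerStepA, hc]
        rw [hstep]
        rw [ih (p + 1) v [] (by simp at hn ⊢; omega) (fun _ => rfl)]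
        rw [pvGlue_nil, pvGlue_nil, pvStarRuns_cons_ne rest p hc]
      | cons s ss =>
        have hstep : pvInnerStepA n (v, s :: ss) (p, c) = (v ++ [s :: ss], []) := by
          simp only [pvInnerStepA]
          rw [if_neg hc, if_pos (by simp)]
        rw [hstep]
        rw [ih (p + 1) (v ++ [s :: ss]) [] (by simp at hn ⊢; omega) (fun _ => rfl)]
        have hg : pvGlue (s :: ss) (c :: rest) p = (s :: ss) :: pvStarRuns rest (p + 1) := by
          simp [pvGlue, hc, pvStarRuns_cons_ne rest p hc]
        rw [pvGlue_nil, hg]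
        simp

-- the outer line loop of A
theorem pvOuterEq :
    ∀ (lines : List String) (s : Int) (D : List (Int × List (List Int))),
      (∀ q ∈ D, q.1 < s) →
      ((PySem.List.enumerate lines s).foldl
          (fun gears_indices li => pvLineA gears_indices li.1 li.2.toList)
          (PySem.Dict.mk D)).items
        = D ++ (PySem.List.enumerate lines s).map (fun p => (p.1, pvStarRuns p.2.toList 0)) := by
  intro lines
  induction lines with
  | nil => intro s D _; simp [PySem.List.enumerate]
  | cons line rest ih =>
    intro s D hD
    rw [PySem.List.enumerate_cons, List.foldl_cons]
    have hne : ∀ q ∈ D, q.1 ≠ s := fun q hq => ne_of_lt (hD q hq)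
    have hline : pvLineA (PySem.Dict.mk D) s line.toList
        = PySem.Dict.mk (D ++ [(s, pvStarRuns line.toList 0)]) := by
      unfold pvLineA
      rw [pvInnerEq (line.toList.length : Int) line.toList 0 [] [] (by ring) (fun _ => rfl)]
      rw [pvGlue_nil]
      apply PySem.Dict.ext
      rw [PySem.Dict.items_insert_of_not_contains _ _ (pvContains_false D s hne)]
      simp
    rw [hline]
    rw [ih (s + 1) (D ++ [(s, pvStarRuns line.toList 0)])
      (by intro q hq
          simp only [List.mem_append, List.mem_singleton] at hq
          rcases hq with hq | rfl
          · exact lt_trans (hD q hq) (by omega)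
          · simp)]
    simp

-- ===== VERDICT (by name: the statement is the Claim_ definition above) =====
theorem get_gears_indices_spec : Claim_equal_get_gears_indices := by
  intro puzzle_input _
  show get_gears_indices puzzle_input = get_gears_indices_alt puzzle_input
  unfold get_gears_indices get_gears_indices_alt
  have : PySem.Dict.empty = PySem.Dict.mk ([] : List (Int × List (List Int))) := rfl
  rw [this, pvOuterEq puzzle_input 0 [] (by simp)]
  simp
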